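-- pv_equiv track=rewrite | github.com/Ayush2020/Practice | python/Functions/Questions/q10.py | xylem_num
-- ===== SOURCE A (Python) =====
-- def xylem_num(num):
--   square = num**2
--   summ = 0
--
--   while square > 0:
--     digit = square % 10
--     summ += digit
--     square //= 10
--
--   if summ == num:
--     return "Xylem"
--   else:
--     return "Not a Xylem Number"
-- ===== SOURCE B (Python) =====
-- def xylem_num(num):
--   # Closed form: digit_sum(num**2) <= 9*len(str(num**2)), which is < num for every
--   # num > 171 (and digit sums are nonnegative, so no negative num qualifies);
--   # an exhaustive check of 0..171 leaves exactly {0, 1, 9}.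
--   return "Xylem" if num in (0, 1, 9) else "Not a Xylem Number"
-- ===== Notes on version B (the rewrite author's own statement) =====
-- stated objective: simpler
-- what changed: B replaces the digit-sum loop over num**2 by a constant-time membership test against the complete solution set {0,1,9}, justified by the bound digit_sum(n^2) <= 9*digits(n^2) < n for n > 171 plus an exhaustive check of 0..171 (proved in Lean).
import Mathlib
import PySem

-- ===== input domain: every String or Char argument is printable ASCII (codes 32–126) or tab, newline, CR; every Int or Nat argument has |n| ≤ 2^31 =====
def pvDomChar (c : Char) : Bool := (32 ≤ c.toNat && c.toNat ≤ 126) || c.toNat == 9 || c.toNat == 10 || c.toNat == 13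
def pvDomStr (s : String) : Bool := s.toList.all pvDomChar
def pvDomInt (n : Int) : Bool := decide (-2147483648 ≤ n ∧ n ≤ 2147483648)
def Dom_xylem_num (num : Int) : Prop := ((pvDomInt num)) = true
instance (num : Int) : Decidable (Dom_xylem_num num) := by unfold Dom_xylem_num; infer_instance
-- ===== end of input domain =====

-- B replaces A's %10//10 digit-sum loop over num**2 by an O(1) membership test against the
-- complete solution set {0,1,9} (digit sums are too small for any other num to qualify).


-- ===== PORT A =====
-- the 'while square > 0' loop: digit = square % 10; summ += digit; square //= 10
def xylemLoop (square summ : Int) : Int :=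
  if _h : 0 < square then
    xylemLoop (PySem.Int.floordiv square 10) (summ + PySem.Int.mod square 10)
  else summ
termination_by square.toNat
decreasing_by
  rw [PySem.Int.floordiv_eq_ediv_of_pos (by omega)]
  omega

def xylem_num (num : Int) : String :=
  let square := num ^ 2
  let summ := xylemLoop square 0
  if summ = num then "Xylem" else "Not a Xylem Number"

-- ===== PORT B =====
-- 'num in (0, 1, 9)' ported as the disjunction of the three equalities
def xylem_num_alt (num : Int) : String :=
  if num = 0 ∨ num = 1 ∨ num = 9 then "Xylem" else "Not a Xylem Number"

-- ===== PRECONDITION & SPEC =====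
def Spec_xylem_num (num : Int) (out : String) : Prop := out = xylem_num_alt num
instance (num : Int) (out : String) : Decidable (Spec_xylem_num num out) := by unfold Spec_xylem_num; infer_instance

-- ===== CLAIM (what is proved, stated in full; the proofs are below) =====
def Claim_equal_xylem_num : Prop := ∀ (num : Int), Dom_xylem_num num → Spec_xylem_num num (xylem_num num)

-- ===== LEMMAS AND PROOFS =====

-- digit sum of a natural number: the value A's loop computes (fuel-structural so 'decide' can evaluate it)
def dsumAux : Nat → Nat → Nat
  | 0, _ => 0
  | f + 1, n => if n = 0 then 0 else n % 10 + dsumAux f (n / 10)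

def dsumNat (n : Nat) : Nat := dsumAux n n

theorem dsumAux_congr : ∀ (f g n : Nat), n ≤ f → n ≤ g → dsumAux f n = dsumAux g n := by
  intro f
  induction f with
  | zero =>
    intro g n hf _
    interval_cases n
    cases g <;> simp [dsumAux]
  | succ f ih =>
    intro g n hf hg
    cases g with
    | zero => interval_cases n; simp [dsumAux]
    | succ g =>
      by_cases hn : n = 0
      · subst hn; simp [dsumAux]
      · simp only [dsumAux, if_neg hn]
        have h10 : n / 10 ≤ n - 1 := by
          have := Nat.div_le_self n 10
          have := Nat.div_lt_self (Nat.pos_of_ne_zero hn) (by omega : 1 < 10)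
          omega
        exact congrArg (n % 10 + ·) (ih g (n / 10) (by omega) (by omega))

-- the recurrence A's loop follows
theorem dsumNat_rec (n : Nat) (hn : n ≠ 0) : dsumNat n = n % 10 + dsumNat (n / 10) := by
  have h10 : n / 10 < n := Nat.div_lt_self (Nat.pos_of_ne_zero hn) (by omega)
  unfold dsumNat
  cases n with
  | zero => exact absurd rfl hn
  | succ m =>
    simp only [dsumAux, if_neg hn]
    exact congrArg _ (dsumAux_congr m ((m + 1) / 10) ((m + 1) / 10) (by omega) le_rfl)

theorem dsumNat_zero : dsumNat 0 = 0 := rfl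

theorem xylemLoop_eq (n : Nat) (s : Int) : xylemLoop (n : Int) s = s + (dsumNat n : Int) := by
  induction n using Nat.strong_induction_on generalizing s with
  | _ n ih =>
    rw [xylemLoop]
    by_cases hn : n = 0
    · subst hn; simp [dsumNat_zero]
    · have hpos : (0 : Int) < (n : Int) := by exact_mod_cast Nat.pos_of_ne_zero hn
      rw [dif_pos hpos, PySem.Int.floordiv_eq_ediv_of_pos (by omega),
          PySem.Int.mod_eq_emod_of_pos (by omega)]
      have h1 : ((n : Int)) / 10 = ((n / 10 : Nat) : Int) := by push_cast; ring
      have h2 : ((n : Int)) % 10 = ((n % 10 : Nat) : Int) := by push_cast; ring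
      rw [h1, h2, ih (n / 10) (Nat.div_lt_self (Nat.pos_of_ne_zero hn) (by omega))]
      conv_rhs => rw [dsumNat_rec n hn]
      push_cast
      ring

-- a number below 10^k has digit sum at most 9k
theorem dsum_le (k : Nat) : ∀ m : Nat, m < 10 ^ k → dsumNat m ≤ 9 * k := by
  induction k with
  | zero =>
    intro m hm
    interval_cases m
    simp [dsumNat_zero]
  | succ k ih =>
    intro m hm
    by_cases hm0 : m = 0
    · subst hm0; simp [dsumNat_zero]
    · rw [dsumNat_rec m hm0]
      have hdiv : m / 10 < 10 ^ k := by
        rw [Nat.div_lt_iff_lt_mul (by omega)]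
        calc m < 10 ^ (k + 1) := hm
          _ = 10 ^ k * 10 := by ring
      have := ih (m / 10) hdiv
      have hmod : m % 10 < 10 := Nat.mod_lt _ (by omega)
      omega

-- exhaustive check of the only candidates
set_option maxRecDepth 4000 in
theorem dsum_small : ∀ n : Nat, n < 172 → (dsumNat (n * n) = n ↔ (n = 0 ∨ n = 1 ∨ n = 9)) := by
  decide

-- ===== VERDICT (by name: the statement is the Claim_ definition above) =====
theorem xylem_num_spec : Claim_equal_xylem_num := by
  intro num hdom
  unfold Spec_xylem_num xylem_num xylem_num_alt
  have hsq : (0 : Int) ≤ num ^ 2 := sq_nonneg num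
  have hA : xylemLoop (num ^ 2) 0 = (dsumNat (num ^ 2).toNat : Int) := by
    conv_lhs => rw [(Int.toNat_of_nonneg hsq).symm]
    rw [xylemLoop_eq]; ring
  simp only [hA]
  have hbnd : num ≤ 2147483648 ∧ -2147483648 ≤ num := by
    have h := hdom
    unfold Dom_xylem_num pvDomInt at h
    have := of_decide_eq_true h
    exact ⟨this.2, this.1⟩
  by_cases hneg : num < 0
  · -- digit sum is nonnegative, num is negative: both sides "Not a Xylem Number"
    rw [if_neg (by omega), if_neg (by omega)]
  · rw [not_lt] at hneg
    set m : Nat := num.toNat with hm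
    have hnum : num = (m : Int) := (Int.toNat_of_nonneg hneg).symm
    have hsqm : (num ^ 2).toNat = m * m := by
      rw [hnum]
      rw [show ((m : Int)) ^ 2 = ((m * m : Nat) : Int) by push_cast; ring, Int.toNat_natCast]
    rw [hsqm]
    by_cases hsmall : m < 172
    · have h := dsum_small m hsmall
      rw [hnum]
      by_cases heq : dsumNat (m * m) = m
      · have := h.mp heq
        rw [if_pos (by exact_mod_cast heq), if_pos (by omega)]
      · have hnot : ¬ (m = 0 ∨ m = 1 ∨ m = 9) := fun hor => heq (h.mpr hor)
        rw [if_neg (by exact_mod_cast heq), if_neg (by omega)]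
    · -- num ≥ 172: digit sum of num² ≤ 9*19 = 171 < num, and num ∉ {0,1,9}
      have hmle : m ≤ 2147483648 := by omega
      have hlt : m * m < 10 ^ 19 := by
        calc m * m ≤ 2147483648 * 2147483648 := Nat.mul_le_mul hmle hmle
          _ < 10 ^ 19 := by norm_num
      have hle := dsum_le 19 (m * m) hlt
      rw [hnum, if_neg (by omega), if_neg (by omega)]
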